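-- pv_equiv track=rewrite | github.com/FraLotito/evol-signal-comm | referencial_game/multivariate_signal_class/viz_signal.py | extract_gen
-- ===== SOURCE A (Python) =====
-- def extract_gen(f):
--     insert = False
--     res = ""
--     for i in f:
--         if i == '.':
--             insert = False
--         if insert:
--             res += i
--         if i == '_':
--             insert = True
--     return res
-- ===== SOURCE B (Python) =====
-- def extract_gen(f):
--     out = []
--     for seg in f.split('.'):
--         head, sep, tail = seg.partition('_')
--         if sep:
--             out.append(tail)
--     return ''.join(out)
-- ===== Notes on version B (the rewrite author's own statement) =====
-- stated objective: simpler
-- what changed: Replaces A's per-character boolean flag machine with a declarative decomposition: split the string on '.', take each segment's part after its first '_' via partition, and join the pieces.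
import Mathlib
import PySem

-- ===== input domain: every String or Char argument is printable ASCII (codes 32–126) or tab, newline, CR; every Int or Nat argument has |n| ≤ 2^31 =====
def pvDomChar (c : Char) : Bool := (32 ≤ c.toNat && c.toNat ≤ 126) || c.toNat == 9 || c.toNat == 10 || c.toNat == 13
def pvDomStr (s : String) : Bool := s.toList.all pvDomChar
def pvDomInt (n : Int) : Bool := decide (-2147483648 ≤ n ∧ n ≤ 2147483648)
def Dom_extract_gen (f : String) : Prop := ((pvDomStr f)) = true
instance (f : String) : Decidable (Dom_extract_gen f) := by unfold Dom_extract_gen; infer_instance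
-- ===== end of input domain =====

-- B replaces A's character-by-character flag machine by split('.') + per-segment partition('_'); objective: simpler.

-- ===== PORT A =====
-- A's loop body: a flag/accumulator pair updated per character (res += i is list append; String.ofList at the end).
def pvStepA (st : Bool × List Char) (i : Char) : Bool × List Char :=
  let ins1 := if i = '.' then false else st.1
  let res  := if ins1 then st.2 ++ [i] else st.2
  let ins2 := if i = '_' then true else ins1
  (ins2, res)

def extract_gen (f : String) : String :=
  String.ofList (f.toList.foldl pvStepA (false, [])).2

-- ===== PORT B =====
-- seg.partition('_') ported by hand (exact: Python splits at the FIRST '_'); B only tests sep and uses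
-- the tail, so the triple becomes an Option of the part after the first '_' ('if sep' ↔ isSome).
def pvAfterUnderscore (seg : List Char) : Option (List Char) :=
  match seg.dropWhile (· ≠ '_') with
  | [] => none
  | _ :: tail => some tail

def extract_gen_alt (f : String) : String :=
  String.ofList (PySem.Chars.join [] ((PySem.Chars.splitOn f.toList ['.']).filterMap pvAfterUnderscore))

-- ===== PRECONDITION & SPEC =====
def Spec_extract_gen (f : String) (out : String) : Prop := out = extract_gen_alt f
instance (f : String) (out : String) : Decidable (Spec_extract_gen f out) := by unfold Spec_extract_gen; infer_instance

-- ===== CLAIM (what is proved, stated in full; the proofs are below) =====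
def Claim_equal_extract_gen : Prop := ∀ (f : String), Dom_extract_gen f → Spec_extract_gen f (extract_gen f)

-- ===== LEMMAS AND PROOFS =====

-- Reference form of str.split('.') used by the proofs: structural recursion on the characters.
def pvSplitDot : List Char → List (List Char)
  | [] => [[]]
  | c :: rest =>
    if c = '.' then [] :: pvSplitDot rest
    else (c :: (pvSplitDot rest).headI) :: (pvSplitDot rest).tail

lemma pvSplitDot_ne_nil (l : List Char) : pvSplitDot l ≠ [] := by
  cases l with
  | nil => simp [pvSplitDot]
  | cons c rest => simp only [pvSplitDot]; split <;> simp

lemma pvModifyHead_id {α : Type} (l : List α) : l.modifyHead (fun x => x) = l := by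
  exact congrFun List.modifyHead_id l

lemma pvSplitOn_go_eq : ∀ (l : List Char) (fuel : Nat), l.length < fuel → ∀ (cur : List Char) (accs : List (List Char)),
    PySem.Chars.splitOn.go ['.'] fuel l cur accs = accs.reverse ++ (pvSplitDot l).modifyHead (cur.reverse ++ ·) := by
  intro l
  induction l with
  | nil =>
    intro fuel hf cur accs
    cases fuel with
    | zero => omega
    | succ f => simp [PySem.Chars.splitOn.go, pvSplitDot]
  | cons c rest ih =>
    intro fuel hf cur accs
    cases fuel with
    | zero => omega
    | succ f =>
      simp only [List.length_cons] at hf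
      by_cases hc : c = '.'
      · subst hc
        have hgo : PySem.Chars.splitOn.go ['.'] (f+1) ('.'::rest) cur accs
            = PySem.Chars.splitOn.go ['.'] f rest [] (cur.reverse :: accs) := by
          simp [PySem.Chars.splitOn.go]
        rw [hgo, ih f (by omega) [] (cur.reverse :: accs)]
        simp [pvSplitDot, pvModifyHead_id]
      · have hgo : PySem.Chars.splitOn.go ['.'] (f+1) (c::rest) cur accs
            = PySem.Chars.splitOn.go ['.'] f rest (c :: cur) accs := by
          simp [PySem.Chars.splitOn.go, List.isPrefixOf, Ne.symm hc]
        rw [hgo, ih f (by omega) (c :: cur) accs]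
        obtain ⟨h, t, ht⟩ : ∃ h t, pvSplitDot rest = h :: t := by
          cases hh : pvSplitDot rest with
          | nil => exact absurd hh (pvSplitDot_ne_nil rest)
          | cons h t => exact ⟨h, t, rfl⟩
        simp [pvSplitDot, hc, ht]

lemma pvSplitOn_eq (l : List Char) : PySem.Chars.splitOn l ['.'] = pvSplitDot l := by
  rw [PySem.Chars.splitOn, pvSplitOn_go_eq l (l.length + 1) (by omega) [] []]
  simp [pvModifyHead_id]

lemma pvJoin_nil_eq (parts : List (List Char)) : PySem.Chars.join [] parts = parts.flatten := by
  induction parts with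
  | nil => exact PySem.Chars.join_nil []
  | cons p rest ih =>
    cases rest with
    | nil => simp [PySem.Chars.join, List.intercalate]
    | cons q r => rw [PySem.Chars.join_cons_cons, ih]; simp

lemma pvFoldl_stepA_acc : ∀ (l : List Char) (b : Bool) (res : List Char),
    (l.foldl pvStepA (b, res)).2 = res ++ (l.foldl pvStepA (b, [])).2 := by
  intro l
  induction l with
  | nil => intro b res; simp
  | cons c rest ih =>
    intro b res
    simp only [List.foldl_cons]
    rw [ih _ (pvStepA (b, res) c).2, ih _ (pvStepA (b, []) c).2]
    have : (pvStepA (b, res) c).1 = (pvStepA (b, []) c).1 := by simp [pvStepA]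
    rw [this]
    have h2 : (pvStepA (b, res) c).2 = res ++ (pvStepA (b, []) c).2 := by
      simp [pvStepA]; split <;> simp
    rw [h2, List.append_assoc]

lemma pvMain : ∀ (l : List Char),
    ((l.foldl pvStepA (false, [])).2 = ((pvSplitDot l).filterMap pvAfterUnderscore).flatten)
    ∧ ((l.foldl pvStepA (true, [])).2
        = (pvSplitDot l).headI ++ ((pvSplitDot l).tail.filterMap pvAfterUnderscore).flatten) := by
  intro l
  induction l with
  | nil => constructor <;> simp [pvSplitDot, pvAfterUnderscore]
  | cons c rest ih =>
    obtain ⟨h, t, ht⟩ : ∃ h t, pvSplitDot rest = h :: t := by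
      cases hh : pvSplitDot rest with
      | nil => exact absurd hh (pvSplitDot_ne_nil rest)
      | cons h t => exact ⟨h, t, rfl⟩
    constructor
    · by_cases hc : c = '.'
      · subst hc
        have hstep : pvStepA (false, []) '.' = (false, []) := by decide
        simp only [List.foldl_cons, hstep, ih.1]
        simp [pvSplitDot, pvAfterUnderscore]
      · by_cases hu : c = '_'
        · subst hu
          have hstep : pvStepA (false, []) '_' = (true, []) := by decide
          simp only [List.foldl_cons, hstep, ih.2]
          simp [pvSplitDot, hc, ht, pvAfterUnderscore]
        · have hstep : pvStepA (false, []) c = (false, []) := by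
            simp [pvStepA, hc, hu]
          simp only [List.foldl_cons, hstep, ih.1]
          have hafter : pvAfterUnderscore (c :: h) = pvAfterUnderscore h := by
            simp [pvAfterUnderscore, hu]
          simp [pvSplitDot, hc, ht, List.filterMap_cons, hafter]
    · by_cases hc : c = '.'
      · subst hc
        have hstep : pvStepA (true, []) '.' = (false, []) := by decide
        simp only [List.foldl_cons, hstep, ih.1]
        simp [pvSplitDot]
      · have hstep : pvStepA (true, []) c = (true, [c]) := by
          simp [pvStepA, hc]
        simp only [List.foldl_cons, hstep]
        rw [pvFoldl_stepA_acc rest true [c], ih.2]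
        simp [pvSplitDot, hc, ht]

-- ===== VERDICT (by name: the statement is the Claim_ definition above) =====
theorem extract_gen_spec : Claim_equal_extract_gen := by
  intro f _
  unfold Spec_extract_gen extract_gen extract_gen_alt
  rw [pvSplitOn_eq, pvJoin_nil_eq]
  exact congrArg String.ofList (pvMain f.toList).1
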